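-- pv_equiv track=rewrite | github.com/HY-D1/textbook-pdf-helper | src/algl_pdf_helper/markdown_generator.py | format_sql_code
-- ===== SOURCE A (Python) =====
-- def format_sql_code(text: str) -> str:
--     """Format SQL code with proper markdown syntax.
--
--     Identifies SQL code blocks and formats them with syntax highlighting.
--     """
--     lines = text.split('\n')
--     result = []
--     in_sql_block = False
--     sql_buffer = []
--
--     sql_keywords = ['SELECT', 'FROM', 'WHERE', 'INSERT', 'UPDATE', 'DELETE',
--                     'CREATE', 'ALTER', 'DROP', 'JOIN', 'GROUP', 'ORDER', 'HAVING']
--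
--     for line in lines:
--         stripped = line.strip().upper()
--
--         # Check if this looks like SQL
--         is_sql = any(stripped.startswith(kw) for kw in sql_keywords)
--         is_sql = is_sql or (stripped and '=' in stripped and any(kw in stripped for kw in sql_keywords))
--
--         if is_sql and not in_sql_block:
--             # Start SQL block
--             in_sql_block = True
--             sql_buffer = [line]
--         elif is_sql and in_sql_block:
--             # Continue SQL block
--             sql_buffer.append(line)
--         elif not is_sql and in_sql_block:
--             # End SQL block
--             if sql_buffer:
--                 result.append("```sql")
--                 result.extend(sql_buffer)
--                 result.append("```")
--                 sql_buffer = []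
--             in_sql_block = False
--             result.append(line)
--         else:
--             result.append(line)
--
--     # Handle SQL block at end
--     if in_sql_block and sql_buffer:
--         result.append("```sql")
--         result.extend(sql_buffer)
--         result.append("```")
--
--     return '\n'.join(result)
-- ===== SOURCE B (Python) =====
-- SQL_KEYWORDS = ['SELECT', 'FROM', 'WHERE', 'INSERT', 'UPDATE', 'DELETE',
--                 'CREATE', 'ALTER', 'DROP', 'JOIN', 'GROUP', 'ORDER', 'HAVING']
--
--
-- def _is_sql(line):
--     stripped = line.strip().upper()
--     return (any(stripped.startswith(kw) for kw in SQL_KEYWORDS)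
--             or bool(stripped and '=' in stripped
--                     and any(kw in stripped for kw in SQL_KEYWORDS)))
--
--
-- def format_sql_code(text: str) -> str:
--     """Classify every line once, then emit maximal runs: SQL runs get fenced."""
--     flagged = [(line, _is_sql(line)) for line in text.split('\n')]
--     out = []
--     i = 0
--     n = len(flagged)
--     while i < n:
--         flag = flagged[i][1]
--         j = i
--         while j < n and flagged[j][1] == flag:
--             j += 1
--         chunk = [l for l, _ in flagged[i:j]]
--         if flag:
--             out.append('```sql')
--             out.extend(chunk)
--             out.append('```')
--         else:
--             out.extend(chunk)
--         i = j
--     return '\n'.join(out)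
-- ===== Notes on version B (the rewrite author's own statement) =====
-- stated objective: simpler
-- what changed: Replaces the in_sql_block/sql_buffer state machine with a classify-then-group decomposition: each line is flagged once, then maximal consecutive runs of SQL lines are emitted inside fences and other runs verbatim.
import Mathlib
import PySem

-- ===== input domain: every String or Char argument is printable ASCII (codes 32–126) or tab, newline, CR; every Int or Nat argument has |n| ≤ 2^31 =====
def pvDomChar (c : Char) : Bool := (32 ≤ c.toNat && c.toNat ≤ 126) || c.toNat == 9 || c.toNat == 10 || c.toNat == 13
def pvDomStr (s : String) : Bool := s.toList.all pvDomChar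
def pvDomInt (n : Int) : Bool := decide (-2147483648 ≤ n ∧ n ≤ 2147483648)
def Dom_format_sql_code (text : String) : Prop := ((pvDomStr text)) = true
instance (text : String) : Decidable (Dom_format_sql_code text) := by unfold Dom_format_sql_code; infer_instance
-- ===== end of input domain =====

-- B replaces A's in_sql_block/sql_buffer state machine with a classify-then-group
-- decomposition (flag every line once, then emit maximal runs); objective: simpler.


-- ===== PORT A =====
-- the keyword list and the per-line classification expression are textually identical
-- in both Pythons; they are shared helpers here
def pvKeywords : List String :=
  ["SELECT", "FROM", "WHERE", "INSERT", "UPDATE", "DELETE",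
   "CREATE", "ALTER", "DROP", "JOIN", "GROUP", "ORDER", "HAVING"]

def pvIsSql (line : String) : Bool :=
  let stripped := PySem.Str.upper (PySem.Str.strip line)
  (pvKeywords.any (fun kw => PySem.Str.startswith stripped kw)) ||
    (!(stripped == "") && PySem.Str.isIn "=" stripped &&
      pvKeywords.any (fun kw => PySem.Str.isIn kw stripped))

def format_sql_code (text : String) : String :=
  let lines := (PySem.Str.split? text "\n").getD []
  let st :=
    lines.foldl (fun (st : List String × Bool × List String) line =>
      let result := st.1
      let inSql := st.2.1
      let buf := st.2.2
      let isSql := pvIsSql line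
      if isSql && !inSql then
        (result, true, [line])
      else if isSql && inSql then
        (result, true, buf ++ [line])
      else if !isSql && inSql then
        ((if !buf.isEmpty then result ++ ["```sql"] ++ buf ++ ["```"] else result) ++ [line],
         false, [])
      else
        (result ++ [line], inSql, buf))
      ([], false, [])
  let result :=
    if st.2.1 && !st.2.2.isEmpty then st.1 ++ ["```sql"] ++ st.2.2 ++ ["```"] else st.1
  PySem.Str.join "\n" result

-- ===== PORT B =====
-- walk maximal runs of equally-flagged lines; SQL runs are fenced, others verbatim
def pvRuns : List (String × Bool) → List String
  | [] => []
  | (l, f) :: rest =>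
    let chunk := l :: (rest.takeWhile (fun p => p.2 == f)).map Prod.fst
    (if f then ("```sql" :: chunk) ++ ["```"] else chunk) ++
      pvRuns (rest.dropWhile (fun p => p.2 == f))
termination_by ps => ps.length
decreasing_by
  simp only [List.length_cons]
  exact Nat.lt_succ_of_le (List.length_dropWhile_le _ _)

def format_sql_code_alt (text : String) : String :=
  let flagged := ((PySem.Str.split? text "\n").getD []).map (fun l => (l, pvIsSql l))
  PySem.Str.join "\n" (pvRuns flagged)

-- ===== PRECONDITION & SPEC =====
def Spec_format_sql_code (text : String) (out : String) : Prop := out = format_sql_code_alt text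
instance (text : String) (out : String) : Decidable (Spec_format_sql_code text out) := by unfold Spec_format_sql_code; infer_instance

-- ===== CLAIM (what is proved, stated in full; the proofs are below) =====
def Claim_equal_format_sql_code : Prop := ∀ (text : String), Dom_format_sql_code text → Spec_format_sql_code text (format_sql_code text)

-- ===== LEMMAS AND PROOFS =====

theorem pvRuns_cons_false (l : String) (ps : List (String × Bool)) :
    pvRuns ((l, false) :: ps) = l :: pvRuns ps := by
  cases ps with
  | nil => simp [pvRuns]
  | cons p ps' =>
    obtain ⟨pl, pf⟩ := p
    cases pf with
    | false => simp [pvRuns]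
    | true => simp [pvRuns]

-- A's loop body, named for the proofs
def pvStepA (st : List String × Bool × List String) (line : String) :
    List String × Bool × List String :=
  let result := st.1
  let inSql := st.2.1
  let buf := st.2.2
  let isSql := pvIsSql line
  if isSql && !inSql then
    (result, true, [line])
  else if isSql && inSql then
    (result, true, buf ++ [line])
  else if !isSql && inSql then
    ((if !buf.isEmpty then result ++ ["```sql"] ++ buf ++ ["```"] else result) ++ [line],
     false, [])
  else
    (result ++ [line], inSql, buf)

def pvFin (st : List String × Bool × List String) : List String :=
  if st.2.1 && !st.2.2.isEmpty then st.1 ++ ["```sql"] ++ st.2.2 ++ ["```"] else st.1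

def pvFlag (lines : List String) : List (String × Bool) :=
  lines.map (fun l => (l, pvIsSql l))

theorem pvLoop_eq (lines : List String) :
    (∀ res : List String,
      pvFin (lines.foldl pvStepA (res, false, [])) = res ++ pvRuns (pvFlag lines)) ∧
    (∀ (res buf : List String), buf ≠ [] →
      pvFin (lines.foldl pvStepA (res, true, buf)) =
        res ++ ("```sql" :: (buf ++ (lines.takeWhile pvIsSql))) ++
          "```" :: pvRuns (pvFlag (lines.dropWhile pvIsSql))) := by
  induction lines with
  | nil =>
    refine ⟨fun res => by simp [pvFin, pvFlag, pvRuns], fun res buf hb => ?_⟩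
    simp [pvFin, pvFlag, pvRuns, hb]
  | cons l rest ih =>
    obtain ⟨ih1, ih2⟩ := ih
    constructor
    · intro res
      by_cases h : pvIsSql l = true
      · rw [show (l :: rest).foldl pvStepA (res, false, []) =
              rest.foldl pvStepA (res, true, [l]) by simp [pvStepA, h]]
        rw [ih2 res [l] (by simp)]
        simp [pvFlag, h, pvRuns, List.takeWhile_map, List.dropWhile_map,
          Function.comp_def]
      · rw [show (l :: rest).foldl pvStepA (res, false, []) =
              rest.foldl pvStepA (res ++ [l], false, []) by
            simp [pvStepA, h]]
        rw [ih1 (res ++ [l])]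
        have : pvFlag (l :: rest) = (l, false) :: pvFlag rest := by
          simp [pvFlag, h]
        rw [this, pvRuns_cons_false]
        simp
    · intro res buf hb
      by_cases h : pvIsSql l = true
      · rw [show (l :: rest).foldl pvStepA (res, true, buf) =
              rest.foldl pvStepA (res, true, buf ++ [l]) by simp [pvStepA, h]]
        rw [ih2 res (buf ++ [l]) (by simp)]
        simp [h]
      · rw [show (l :: rest).foldl pvStepA (res, true, buf) =
              rest.foldl pvStepA
                ((res ++ ["```sql"] ++ buf ++ ["```"]) ++ [l], false, []) by
            simp [pvStepA, h, hb]]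
        rw [ih1 _]
        have hfl : pvFlag (l :: rest) = (l, false) :: pvFlag rest := by
          simp [pvFlag, h]
        simp [h, pvRuns_cons_false, pvFlag]

-- ===== VERDICT (by name: the statement is the Claim_ definition above) =====
theorem format_sql_code_spec : Claim_equal_format_sql_code := by
  intro text _
  unfold Spec_format_sql_code
  have e1 : format_sql_code text =
      PySem.Str.join "\n"
        (pvFin (((PySem.Str.split? text "\n").getD []).foldl pvStepA ([], false, []))) := rfl
  have e2 : format_sql_code_alt text =
      PySem.Str.join "\n" (pvRuns (pvFlag ((PySem.Str.split? text "\n").getD []))) := rfl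
  rw [e1, e2, (pvLoop_eq ((PySem.Str.split? text "\n").getD [])).1 [], List.nil_append]
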